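-- pv_equiv track=rewrite | github.com/j-hau/Qush-test | python/2-integerList.py | createIntegerList
-- ===== SOURCE A (Python) =====
-- def createIntegerList(number):
--     # We first want to induce a base case where f(0) returns [].  In this case we initialise the empty array of arrays to be returned empty if n=0.
--     superSet = []
--
--     if(number == 0):
--         return superSet
--     else:
--         """
--             We know one of the constraints of the problem is that f(1) returns [[1]], f(2) returns [[1], [1,2]].
--             It can therefore be assumed that f(n) produces an array of arrays where there are n arrays contained inside of an array.
--             The contents of the internal arrays are the numbers ascending to that index.
--             e.g. the 4th array, will look like [1,2,3,4].  the nth array will look like [1,2,3,4 .... n]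
--
--             We therefore want for the input number amount of times.  As f(1) is [[1]], this tells us we need to account for python indexing at 0 and start from 1.
--             Furthermore, as python goes up to but not including the upper bound of a for loop, we need to loop until "number + 1".
--         """
--         for x in range(1, number+1):
--             # Initialising the sub array to append to the superSet to be empty.
--             subArray = []
--
--             # Looping for the index of the sub array.  E.g. looking at the 3rd sub array in f(3) which is [1,2,3], we want to loop 3 times and add each increment to the sub array
--             # This allows us to append it to the super set with ascending values up to and including that index.
--             for i in range(x):
--                 # As python indexes from 0, we need to add 1 to each value we append.
--                 subArray.append(i+1)
--             # Add this value to the super set.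
--             superSet.append(subArray)
--     return superSet
-- ===== SOURCE B (Python) =====
-- def createIntegerList(number):
--     result = []
--     prefix = []
--     for x in range(1, number + 1):
--         prefix = prefix + [x]
--         result.append(prefix)
--     return result
-- ===== Notes on version B (the rewrite author's own statement) =====
-- stated objective: alternative
-- what changed: B drops A's base-case branch and the inner range(x) loop that rebuilds each sublist element by element, instead extending one running prefix per outer step and appending a fresh copy of it.
import Mathlib
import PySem

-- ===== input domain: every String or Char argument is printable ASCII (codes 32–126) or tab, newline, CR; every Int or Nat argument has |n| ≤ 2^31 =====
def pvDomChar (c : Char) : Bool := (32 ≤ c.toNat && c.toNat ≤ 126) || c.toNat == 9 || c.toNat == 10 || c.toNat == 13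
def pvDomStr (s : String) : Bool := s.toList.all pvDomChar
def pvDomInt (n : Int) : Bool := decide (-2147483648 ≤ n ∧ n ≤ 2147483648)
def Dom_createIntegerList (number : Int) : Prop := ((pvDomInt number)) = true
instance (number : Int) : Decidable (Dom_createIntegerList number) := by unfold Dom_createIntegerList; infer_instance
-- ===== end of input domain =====

-- B replaces A's inner range(x) rebuild loop by one running prefix extended per step (alternative decomposition, same asymptotics).

-- ===== PORT A =====
def createIntegerList (number : Int) : List (List Int) :=
  let superSet : List (List Int) := []
  if number == 0 then superSet
  else
    (PySem.List.pyRange 1 (number + 1) 1).foldl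
      (fun superSet x =>
        let subArray : List Int :=
          (PySem.List.pyRange 0 x 1).foldl (fun subArray i => subArray ++ [i + 1]) []
        superSet ++ [subArray]) superSet

-- ===== PORT B =====
def createIntegerList_alt (number : Int) : List (List Int) :=
  ((PySem.List.pyRange 1 (number + 1) 1).foldl
    (fun st x => (st.1 ++ [st.2 ++ [x]], st.2 ++ [x]))
    (([], []) : List (List Int) × List Int)).1

-- ===== PRECONDITION & SPEC =====
def Spec_createIntegerList (number : Int) (out : List (List Int)) : Prop := out = createIntegerList_alt number
instance (number : Int) (out : List (List Int)) : Decidable (Spec_createIntegerList number out) := by unfold Spec_createIntegerList; infer_instance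

-- ===== CLAIM (what is proved, stated in full; the proofs are below) =====
def Claim_equal_createIntegerList : Prop := ∀ (number : Int), Dom_createIntegerList number → Spec_createIntegerList number (createIntegerList number)

-- ===== LEMMAS AND PROOFS =====

-- appending one image per step is map
theorem pvFoldlAppendMap {α β : Type} (f : α → β) (l : List α) (s : List β) :
    l.foldl (fun s i => s ++ [f i]) s = s ++ l.map f := by
  induction l generalizing s with
  | nil => simp
  | cons a t ih => simp [List.foldl_cons, ih]

-- A's inner loop builds exactly the ascending prefix [1..x]
theorem pvInnerEq (x : Int) :
    (PySem.List.pyRange 0 x 1).foldl (fun subArray i => subArray ++ [i + 1]) [] =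
      PySem.List.pyRange 1 (x + 1) 1 := by
  rw [pvFoldlAppendMap (f := fun i => i + 1)]
  simp only [List.nil_append, PySem.List.pyRange_one, List.map_map]
  have h : (x - 0).toNat = (x + 1 - 1).toNat := by omega
  rw [h]
  apply List.map_congr_left
  intro k _
  simp; omega

-- B's paired fold: the accumulator is the list of prefixes plus the current prefix
theorem pvBfold (n : Nat) :
    (PySem.List.pyRange 1 ((n : Int) + 1) 1).foldl
        (fun st x => (st.1 ++ [st.2 ++ [x]], st.2 ++ [x]))
        (([], []) : List (List Int) × List Int) =
      ((PySem.List.pyRange 1 ((n : Int) + 1) 1).map (fun x => PySem.List.pyRange 1 (x + 1) 1),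
        PySem.List.pyRange 1 ((n : Int) + 1) 1) := by
  induction n with
  | zero => simp [PySem.List.pyRange_one_eq_nil]
  | succ n ih =>
    have hcast : ((n + 1 : Nat) : Int) + 1 = ((n : Int) + 1) + 1 := by push_cast; ring
    have hstep : PySem.List.pyRange 1 (((n : Int) + 1) + 1) 1 =
        PySem.List.pyRange 1 ((n : Int) + 1) 1 ++ [(n : Int) + 1] :=
      PySem.List.pyRange_one_succ_right (by omega)
    rw [hcast, hstep, List.foldl_append, ih]
    simp only [List.foldl_cons, List.foldl_nil, List.map_append, List.map_cons, List.map_nil, hstep]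

theorem pvBoth (number : Int) :
    createIntegerList number = createIntegerList_alt number := by
  by_cases h : number ≤ 0
  · have hnil : PySem.List.pyRange 1 (number + 1) 1 = [] :=
      PySem.List.pyRange_one_eq_nil (by omega)
    simp [createIntegerList, createIntegerList_alt, hnil]
  · rw [Int.not_le] at h
    have hn : number = ((number.toNat : Nat) : Int) := by omega
    have hne : (number == 0) = false := by simp; omega
    unfold createIntegerList createIntegerList_alt
    simp only [hne, Bool.false_eq_true, if_false]
    rw [hn, pvBfold]
    rw [pvFoldlAppendMap
      (f := fun x => (PySem.List.pyRange 0 x 1).foldl (fun subArray i => subArray ++ [i + 1]) [])]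
    simp only [List.nil_append]
    exact List.map_congr_left (fun x _ => pvInnerEq x)

-- ===== VERDICT (by name: the statement is the Claim_ definition above) =====
theorem createIntegerList_spec : Claim_equal_createIntegerList := by
  intro number _
  unfold Spec_createIntegerList
  exact pvBoth number
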